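-- pv_equiv track=rewrite | github.com/Shiv1202/DataStructure_and_Algorithms_Python_and_cpp | CodeChef/July long challenge/Doctor_chef_DRCHEF.py | solution
-- ===== SOURCE A (Python) =====
-- def solution(n, p, x):
--     p.sort();
--     min_day = 0; temp = []
--
--     for i in range(n):
--         if (p[i] < x / 2):
--             min_day += 1
--         else:
--             temp.append(p[i])
--     i = 0
--     while i < len(temp):
--         if x < temp[i]:
--             x = 2 * x
--             min_day += 1
--         else:
--             min_day += 1
--             x = 2 * temp[i]; i += 1
--     return min_day
-- ===== SOURCE B (Python) =====
-- def solution(n, p, x):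
--     p.sort()
--     days = 0
--     for i in range(n):
--         v = p[i]
--         if 2 * v < x:
--             days += 1
--         else:
--             # smallest d >= 0 with x * 2**d >= v, in closed form
--             q = -(-v // x)                 # ceil(v / x)
--             days += (q - 1).bit_length() + 1
--             x = 2 * v
--     return days
-- ===== Notes on version B (the rewrite author's own statement) =====
-- stated objective: alternative
-- what changed: B fuses A's two phases into one pass over the sorted prefix and replaces the step-by-step doubling while-loop by a closed-form doubling count per element (ceil-division plus bit_length).
-- outside the precondition, e.g. on solution(1, [0], 0): A returns 1, B raises ZeroDivisionError
import Mathlib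
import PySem

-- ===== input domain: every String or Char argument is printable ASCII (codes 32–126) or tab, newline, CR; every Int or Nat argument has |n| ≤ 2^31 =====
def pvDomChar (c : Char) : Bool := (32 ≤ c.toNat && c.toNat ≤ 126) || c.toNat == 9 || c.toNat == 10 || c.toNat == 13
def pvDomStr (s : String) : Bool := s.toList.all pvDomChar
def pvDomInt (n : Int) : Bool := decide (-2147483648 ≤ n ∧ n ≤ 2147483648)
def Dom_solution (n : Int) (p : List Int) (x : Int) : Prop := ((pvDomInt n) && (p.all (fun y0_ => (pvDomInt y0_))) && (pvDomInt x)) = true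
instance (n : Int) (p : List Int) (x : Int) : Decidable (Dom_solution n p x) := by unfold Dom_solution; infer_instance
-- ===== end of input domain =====

-- B fuses A's two phases into one pass over the sorted prefix and replaces the doubling
-- while-loop by a closed-form count (ceil-division + bit_length).  Both A and B sort p in
-- place; the equivalence proved here is about the return value (the mutation is identical).

-- ===== PORT A =====
-- the while loop of A, with fuel (the loop can diverge; under Pre_ the fuel is never exhausted)
def solLoopA : Nat → Int → List Int → Int → Int
  | _, _, [], minDay => minDay
  | 0, _, _ :: _, minDay => minDay
  | f + 1, x, v :: rest, minDay =>
      if x < v then solLoopA f (2 * x) (v :: rest) (minDay + 1)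
      else solLoopA f (2 * v) rest (minDay + 1)

-- one step of A's first for-loop; `p[i] < x / 2` is ported as `2 * p[i] < x`,
-- exact for ints in Dom (|values| ≤ 2^31 < 2^53, so the float comparison is exact)
def solStepA (x : Int) (st : Int × List Int) (v : Int) : Int × List Int :=
  if 2 * v < x then (st.1 + 1, st.2) else (st.1, st.2 ++ [v])

def solution (n : Int) (p : List Int) (x : Int) : Int :=
  let ps := PySem.List.sorted p (fun a => a) false
  let st := (PySem.List.pyRange 0 n 1).foldl
    (fun st i => solStepA x st (PySem.List.pyGetD ps i 0)) (0, [])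
  solLoopA (64 * (st.2.length + 1)) x st.2 st.1

-- ===== PORT B =====
-- one step of B's single loop: `2 * v < x` counts one day; otherwise the closed-form
-- doubling count q = ceil(v/x) = -(-v // x), days += (q-1).bit_length() + 1, x = 2*v
def solStepB (st : Int × Int) (v : Int) : Int × Int :=
  if 2 * v < st.2 then (st.1 + 1, st.2)
  else (st.1 + (PySem.Int.bitLength (-(PySem.Int.floordiv (-v) st.2) - 1) : Int) + 1, 2 * v)

def solution_alt (n : Int) (p : List Int) (x : Int) : Int :=
  let ps := PySem.List.sorted p (fun a => a) false
  ((PySem.List.pyRange 0 n 1).foldl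
    (fun st i => solStepB st (PySem.List.pyGetD ps i 0)) (0, x)).1

-- ===== PRECONDITION & SPEC =====
-- Pre_ excludes: n > len(p), where A raises IndexError; and x ≤ 0 with some element of the
-- sorted n-prefix having 2*v ≥ x, where A loops forever (x never reaches a positive target)
-- except in the corner x = 0 with such elements all 0, where A returns but B's own
-- ceil-division raises ZeroDivisionError.
def Pre_solution (n : Int) (p : List Int) (x : Int) : Prop :=
  n ≤ p.length ∧
    (1 ≤ x ∨ ∀ v ∈ (PySem.List.sorted p (fun a => a) false).take n.toNat, 2 * v < x)
instance (n : Int) (p : List Int) (x : Int) : Decidable (Pre_solution n p x) := by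
  unfold Pre_solution; infer_instance

def pvWitness_solution : Int × List Int × Int := (3, [5, 1, 9], 2)

def Spec_solution (n : Int) (p : List Int) (x : Int) (out : Int) : Prop := out = solution_alt n p x
instance (n : Int) (p : List Int) (x : Int) (out : Int) : Decidable (Spec_solution n p x out) := by unfold Spec_solution; infer_instance

-- ===== CLAIM (what is proved, stated in full; the proofs are below) =====
def Claim_equal_solution : Prop := ∀ (n : Int) (p : List Int) (x : Int), Dom_solution n p x → Pre_solution n p x → Spec_solution n p x (solution n p x)

-- ===== LEMMAS AND PROOFS =====

-- fold over range(n) with indexing = fold over the n-prefix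
theorem pv_fold_take {β : Type} (xs : List Int) (n : Int) (hn : n ≤ xs.length)
    (f : β → Int → β) (init : β) :
    (PySem.List.pyRange 0 n 1).foldl (fun st i => f st (PySem.List.pyGetD xs i 0)) init
      = (xs.take n.toNat).foldl f init := by
  rw [PySem.List.pyRange_one, List.foldl_map]
  have hm : n.toNat ≤ xs.length := by omega
  have key : ∀ (m : Nat), m ≤ xs.length → ∀ (init : β),
      (List.range m).foldl (fun st (k : Nat) => f st (PySem.List.pyGetD xs (0 + (k : Int)) 0)) init
        = (xs.take m).foldl f init := by
    intro m
    induction m with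
    | zero => intro _ init; simp
    | succ m ih =>
      intro hle init
      have hmlt : m < xs.length := by omega
      rw [List.range_succ, List.foldl_append, ih (by omega),
        show List.take (m+1) xs = List.take m xs ++ [xs[m]] from by
          rw [List.take_add_one, List.getElem?_eq_getElem hmlt]; rfl,
        List.foldl_append]
      simp [PySem.List.pyGetD_natCast, List.getD_eq_getElem?_getD,
        List.getElem?_eq_getElem hmlt]
  have h2 : (n - 0).toNat = n.toNat := by omega
  rw [h2]
  exact key n.toNat hm init

-- A's first loop, all elements small: every element just counts a day
theorem pv_Asmall (x : Int) : ∀ (a : List Int) (c : Int) (t : List Int),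
    (∀ v ∈ a, 2 * v < x) → a.foldl (solStepA x) (c, t) = (c + a.length, t) := by
  intro a
  induction a with
  | nil => intro c t _; simp
  | cons v rest ih =>
    intro c t h
    have hv : 2 * v < x := h v (by simp)
    rw [List.foldl_cons, show solStepA x (c, t) v = (c + 1, t) from by simp [solStepA, hv],
      ih (c + 1) t (fun w hw => h w (by simp [hw]))]
    simp only [List.length_cons, Prod.mk.injEq]
    exact ⟨by push_cast; ring, trivial⟩

-- A's first loop, all elements big: every element is appended to temp
theorem pv_Abig (x : Int) : ∀ (a : List Int) (c : Int) (t : List Int),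
    (∀ v ∈ a, ¬ (2 * v < x)) → a.foldl (solStepA x) (c, t) = (c, t ++ a) := by
  intro a
  induction a with
  | nil => intro c t _; simp
  | cons v rest ih =>
    intro c t h
    have hv : ¬ 2 * v < x := h v (by simp)
    rw [List.foldl_cons, show solStepA x (c, t) v = (c, t ++ [v]) from by simp [solStepA, hv],
      ih c (t ++ [v]) (fun w hw => h w (by simp [hw]))]
    simp

-- A's first loop on a sorted list: counts the takeWhile-prefix, appends the dropWhile-suffix
theorem pv_phase1 (x : Int) : ∀ (l : List Int), l.Pairwise (· ≤ ·) → ∀ (c : Int) (t : List Int),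
    l.foldl (solStepA x) (c, t)
      = (c + (l.takeWhile (fun v => decide (2 * v < x))).length,
         t ++ l.dropWhile (fun v => decide (2 * v < x))) := by
  intro l
  induction l with
  | nil => intro _ c t; simp
  | cons v rest ih =>
    intro hp c t
    obtain ⟨hhd, hrest⟩ := List.pairwise_cons.mp hp
    by_cases hv : 2 * v < x
    · rw [List.foldl_cons, show solStepA x (c, t) v = (c + 1, t) from by simp [solStepA, hv],
        ih hrest (c + 1) t]
      simp [hv]
      ring
    · have hall : ∀ w ∈ rest, ¬ (2 * w < x) := by
        intro w hw hlt
        exact hv (by have := hhd w hw; omega)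
      rw [List.foldl_cons, show solStepA x (c, t) v = (c, t ++ [v]) from by simp [solStepA, hv],
        pv_Abig x rest c (t ++ [v]) hall]
      simp [hv]

-- B's loop, all elements small: every element just counts a day, x unchanged
theorem pv_Bsmall : ∀ (a : List Int) (c x : Int),
    (∀ v ∈ a, 2 * v < x) → a.foldl solStepB (c, x) = (c + a.length, x) := by
  intro a
  induction a with
  | nil => intro c x _; simp
  | cons v rest ih =>
    intro c x h
    have hv : 2 * v < x := h v (by simp)
    rw [List.foldl_cons, show solStepB (c, x) v = (c + 1, x) from by simp [solStepB, hv],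
      ih (c + 1) x (fun w hw => h w (by simp [hw]))]
    simp only [List.length_cons, Prod.mk.injEq]
    exact ⟨by push_cast; ring, trivial⟩

-- every element of the dropWhile-suffix of a sorted list is big
theorem pv_dropWhile_big (x : Int) : ∀ (l : List Int), l.Pairwise (· ≤ ·) →
    ∀ v ∈ l.dropWhile (fun v => decide (2 * v < x)), x ≤ 2 * v := by
  intro l
  induction l with
  | nil => simp
  | cons v rest ih =>
    intro hp w hw
    obtain ⟨hhd, hrest⟩ := List.pairwise_cons.mp hp
    by_cases hv : 2 * v < x
    · rw [List.dropWhile_cons] at hw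
      simp [hv] at hw
      exact ih hrest w hw
    · rw [List.dropWhile_cons] at hw
      simp [hv] at hw
      rcases hw with rfl | hw
      · omega
      · have := hhd w hw; omega

-- closed-form doubling count: q = ceil(v/x), d = (q-1).bit_length() is the least d with x*2^d ≥ v
theorem pv_dbl_formula (x v : Int) (hx : 1 ≤ x) (hv : 1 ≤ v) :
    v ≤ x * 2 ^ PySem.Int.bitLength (-(PySem.Int.floordiv (-v) x) - 1)
    ∧ (∀ e : Nat, e < PySem.Int.bitLength (-(PySem.Int.floordiv (-v) x) - 1) → x * 2 ^ e < v)
    ∧ (v ≤ 2 ^ 31 → PySem.Int.bitLength (-(PySem.Int.floordiv (-v) x) - 1) + 1 ≤ 64) := by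
  set q : Int := -(PySem.Int.floordiv (-v) x) with hqdef
  have hq : (q - 1) * x < v ∧ v ≤ q * x :=
    (PySem.Int.neg_floordiv_neg_eq_iff_of_pos (by omega)).mp rfl
  have hq1 : 1 ≤ q := by nlinarith [hq.1, hq.2]
  set m : Int := q - 1 with hmdef
  have hm0 : 0 ≤ m := by omega
  have habs : (m.natAbs : Int) = m := Int.natAbs_of_nonneg hm0
  set d : Nat := PySem.Int.bitLength m with hddef
  have hlt : m.natAbs < 2 ^ d := PySem.Int.lt_two_pow_bitLength m
  have hltI : m < 2 ^ d := by
    calc m = (m.natAbs : Int) := habs.symm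
    _ < ((2 ^ d : Nat) : Int) := by exact_mod_cast hlt
    _ = 2 ^ d := by push_cast; ring
  refine ⟨?_, ?_, ?_⟩
  · have : q ≤ 2 ^ d := by omega
    nlinarith [pow_pos (show (0:Int) < 2 by norm_num) d, hq.2]
  · intro e he
    have hmne : m ≠ 0 := by
      intro h0
      rw [h0, PySem.Int.bitLength_zero] at hddef
      omega
    have hle : 2 ^ (d - 1) ≤ m.natAbs := PySem.Int.two_pow_bitLength_le m hmne
    have h2 : (2 : Nat) ^ e ≤ 2 ^ (d - 1) := Nat.pow_le_pow_right (by norm_num) (by omega)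
    have h3 : ((2 : Int)) ^ e ≤ m := by
      calc ((2:Int)) ^ e = ((2 ^ e : Nat) : Int) := by push_cast; ring
      _ ≤ ((2 ^ (d-1) : Nat) : Int) := by exact_mod_cast h2
      _ ≤ (m.natAbs : Int) := by exact_mod_cast hle
      _ = m := habs
    nlinarith [hq.1, pow_pos (show (0:Int) < 2 by norm_num) e]
  · intro hvbound
    have hmlt : m < 2 ^ 31 := by nlinarith [hq.1]
    by_cases hmne : m = 0
    · rw [hmne] at hddef
      rw [hddef, PySem.Int.bitLength_zero]
      omega
    · have hle : 2 ^ (d - 1) ≤ m.natAbs := PySem.Int.two_pow_bitLength_le m hmne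
      have h31 : m.natAbs < 2 ^ 31 := by omega
      have : 2 ^ (d - 1) < 2 ^ 31 := lt_of_le_of_lt hle h31
      have hd31 : d - 1 < 31 := (Nat.pow_lt_pow_iff_right (by norm_num)).mp this
      omega

-- A's while loop consumes one temp element in exactly d+1 steps
theorem pv_loopA_elem (v : Int) (rest : List Int) : ∀ (d g : Nat) (x acc : Int), 1 ≤ x →
    v ≤ x * 2 ^ d → (∀ e : Nat, e < d → x * 2 ^ e < v) →
    solLoopA (d + 1 + g) x (v :: rest) acc = solLoopA g (2 * v) rest (acc + d + 1) := by
  intro d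
  induction d with
  | zero =>
    intro g x acc hx hle _
    have hnl : ¬ x < v := by simp at hle; omega
    rw [Nat.add_comm 1 g]
    show solLoopA (g + 1) x (v :: rest) acc = _
    simp only [solLoopA, if_neg hnl]
    norm_num
  | succ d ih =>
    intro g x acc hx hle hlt
    have hxv : x < v := by have := hlt 0 (by omega); simpa using this
    have step : solLoopA (d + 1 + 1 + g) x (v :: rest) acc
        = solLoopA (d + 1 + g) (2 * x) (v :: rest) (acc + 1) := by
      rw [show d + 1 + 1 + g = (d + 1 + g) + 1 from by omega]
      simp only [solLoopA, if_pos hxv]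
    rw [step, ih g (2 * x) (acc + 1) (by omega)
      (by rw [show x * 2 ^ (d + 1) = 2 * x * 2 ^ d from by ring] at hle; exact hle)
      (by intro e he
          have := hlt (e + 1) (by omega)
          rw [show x * 2 ^ (e + 1) = 2 * x * 2 ^ e from by ring] at this
          exact this)]
    congr 1
    push_cast; ring

-- A's while loop = B's fold, on the big suffix
theorem pv_loopA_eq_B : ∀ (t : List Int) (x acc : Int) (f : Nat), 1 ≤ x →
    t.Pairwise (· ≤ ·) → (∀ v ∈ t, 1 ≤ v ∧ v ≤ 2 ^ 31) →
    (∀ v ∈ t.head?, x ≤ 2 * v) → 64 * t.length + 64 ≤ f →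
    solLoopA f x t acc = (t.foldl solStepB (acc, x)).1 := by
  intro t
  induction t with
  | nil => intro x acc f _ _ _ _ _; cases f <;> simp [solLoopA]
  | cons v rest ih =>
    intro x acc f hx hp hb hhd hf
    obtain ⟨hle, hrest⟩ := List.pairwise_cons.mp hp
    have hxv : x ≤ 2 * v := hhd v (by simp)
    have hv1 : 1 ≤ v := by omega
    have hv2 : v ≤ 2 ^ 31 := (hb v (by simp)).2
    obtain ⟨hA, hB, hC⟩ := pv_dbl_formula x v hx hv1
    set d : Nat := PySem.Int.bitLength (-(PySem.Int.floordiv (-v) x) - 1) with hddef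
    have hd64 : d + 1 ≤ 64 := hC hv2
    have hsplit : f = d + 1 + (f - (d + 1)) := by omega
    rw [hsplit, pv_loopA_elem v rest d (f - (d + 1)) x acc hx hA hB]
    rw [ih (2 * v) (acc + d + 1) (f - (d + 1)) (by omega) hrest
      (fun w hw => hb w (by simp [hw]))
      (by intro w hw
          have hwmem : w ∈ rest := List.mem_of_mem_head? hw
          have := hle w hwmem
          omega)
      (by simp at hf ⊢; omega)]
    rw [List.foldl_cons, show solStepB (acc, x) v = (acc + d + 1, 2 * v) from by
      simp [solStepB, show ¬ 2 * v < x from by omega, ← hddef]]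

theorem solution_spec : Claim_equal_solution := by
  intro n p x hdom hpre
  obtain ⟨hn, hcase⟩ := hpre
  have hlen : (PySem.List.sorted p (fun a => a) false).length = p.length :=
    PySem.List.length_sorted p (fun a => a) false
  simp only [Spec_solution, solution, solution_alt]
  set ps : List Int := PySem.List.sorted p (fun a => a) false with hps
  have hn' : n ≤ ps.length := by rw [hlen]; exact hn
  rw [pv_fold_take ps n hn' (solStepA x) (0, []),
      pv_fold_take ps n hn' solStepB (0, x)]
  set l : List Int := ps.take n.toNat with hl
  have hsort : l.Pairwise (· ≤ ·) := by
    have h1 : ps.Pairwise (fun a b => (fun a => a) a ≤ (fun a => a) b) :=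
      PySem.List.sorted_pairwise p (fun a => a)
    exact List.Pairwise.sublist (List.take_sublist _ _) h1
  have hbound : ∀ v ∈ l, -2 ^ 31 ≤ v ∧ v ≤ 2 ^ 31 := by
    intro v hv
    have hvp : v ∈ p := by
      have : v ∈ ps := List.mem_of_mem_take hv
      exact (PySem.List.mem_sorted _ _ _ _).mp this
    have := hdom
    simp only [Dom_solution, Bool.and_eq_true, List.all_eq_true, pvDomInt,
      decide_eq_true_eq] at this
    have h := this.1.2 v hvp
    constructor <;> omega
  by_cases hx : 1 ≤ x
  · -- general case: split l into the small prefix and the big suffix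
    rw [pv_phase1 x l hsort 0 []]
    set a : List Int := l.takeWhile (fun v => decide (2 * v < x)) with ha
    set b : List Int := l.dropWhile (fun v => decide (2 * v < x)) with hb
    have hbbig : ∀ v ∈ b, x ≤ 2 * v := pv_dropWhile_big x l hsort
    have hsplit : l = a ++ b := (List.takeWhile_append_dropWhile).symm
    rw [show l.foldl solStepB (0, x) = b.foldl solStepB ((0 : Int) + a.length, x) from by
      rw [hsplit, List.foldl_append, pv_Bsmall a 0 x
        (fun v hv => by simpa using List.mem_takeWhile_imp hv)]]
    rw [List.nil_append]
    exact pv_loopA_eq_B b x (0 + a.length) (64 * (b.length + 1)) hx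
      (List.Pairwise.sublist (List.sublist_append_right a b) (hsplit ▸ hsort))
      (fun v hv => by
        have h1 := hbbig v hv
        have h2 := hbound v (hsplit ▸ List.mem_append_right a hv)
        constructor <;> omega)
      (fun v hv => hbbig v (List.mem_of_mem_head? hv))
      (by omega)
  · -- x ≤ 0: the precondition forces every prefix element to be small
    have hall : ∀ v ∈ l, 2 * v < x := by
      rcases hcase with h1 | h2
      · omega
      · exact h2
    rw [pv_Asmall x l 0 [] hall, pv_Bsmall l 0 x hall]
    cases hml : l with
    | nil => simp [solLoopA]
    | cons v rest => simp [solLoopA]
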